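-- pv_equiv track=rewrite | github.com/BosshammerXD/KV-LaTex-Maker | src/DataStructures/CompleteListBinTree.py | __get_heights
-- ===== SOURCE A (Python) =====
-- from collections.abc import Callable, Iterable, Iterator
--
-- def __get_heights(height: int) -> Iterator[int]:
--     if height < 0:
--         return
--     stack = [height]
--     while stack:
--         current = stack.pop()
--         yield current
--         if current > 0:
--             stack.append(current - 1)
--             stack.append(current - 1)
-- ===== SOURCE B (Python) =====
-- def _heights_list(h):
--     if h < 0:
--         return []
--     sub = _heights_list(h - 1)
--     return [h] + sub + sub
--
-- def __get_heights(height: int):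
--     yield from _heights_list(height)
-- ===== Notes on version B (the rewrite author's own statement) =====
-- stated objective: simpler
-- what changed: Replaced the explicit LIFO stack loop with a direct recursion that builds the child subtree's height list once and concatenates it twice after the node, removing the stack bookkeeping and sharing the identical subtrees.
import Mathlib
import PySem

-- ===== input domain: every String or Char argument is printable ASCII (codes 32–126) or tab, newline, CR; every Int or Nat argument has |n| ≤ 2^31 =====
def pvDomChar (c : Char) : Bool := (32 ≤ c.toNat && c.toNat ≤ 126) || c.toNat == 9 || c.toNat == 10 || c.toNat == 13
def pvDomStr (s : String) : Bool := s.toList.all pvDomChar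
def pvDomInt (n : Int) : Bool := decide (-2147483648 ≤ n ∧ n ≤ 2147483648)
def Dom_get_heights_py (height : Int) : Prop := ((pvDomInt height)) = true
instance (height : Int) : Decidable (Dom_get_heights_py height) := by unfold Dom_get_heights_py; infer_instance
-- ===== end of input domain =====

-- B replaces A's explicit LIFO-stack loop by a direct recursive generator (yield node, recurse twice); objective: simpler.

-- ===== PORT A =====
-- A's while-loop over the stack; the list head is the stack top (append+pop at the end = push/pop at the head).
def pvLoopA (stack : List Int) : List Int :=
  match stack with
  | [] => []
  | current :: rest =>
      if current > 0 then current :: pvLoopA ((current - 1) :: (current - 1) :: rest)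
      else current :: pvLoopA rest
termination_by (stack.map (fun h : Int => 3 ^ h.toNat)).sum
decreasing_by
  · have h1 : (current - 1).toNat + 1 = current.toNat := by omega
    simp only [List.map_cons, List.sum_cons]
    have : (3:ℕ) ^ (current - 1).toNat + 3 ^ (current - 1).toNat < 3 ^ current.toNat := by
      rw [← h1, pow_succ]
      have hp : 0 < (3:ℕ) ^ (current - 1).toNat := pow_pos (by norm_num) _
      omega
    omega
  · simp only [List.map_cons, List.sum_cons]
    have hp : 0 < (3:ℕ) ^ current.toNat := pow_pos (by norm_num) _
    omega

def get_heights_py (height : Int) : List Int :=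
  if height < 0 then [] else pvLoopA [height]

-- ===== PORT B =====
def get_heights_py_alt (height : Int) : List Int :=
  if height < 0 then []
  else
    let sub := get_heights_py_alt (height - 1)
    height :: (sub ++ sub)
termination_by (height + 1).toNat
decreasing_by rename_i h; omega

-- ===== PRECONDITION & SPEC =====
def Spec_get_heights_py (height : Int) (out : List Int) : Prop := out = get_heights_py_alt height
instance (height : Int) (out : List Int) : Decidable (Spec_get_heights_py height out) := by unfold Spec_get_heights_py; infer_instance

-- ===== CLAIM (what is proved, stated in full; the proofs are below) =====
def Claim_equal_get_heights_py : Prop := ∀ (height : Int), Dom_get_heights_py height → Spec_get_heights_py height (get_heights_py height)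

-- ===== LEMMAS AND PROOFS =====

-- A's stack loop flattens B's recursive traversal of each stack entry (all entries are ≥ 0 during A's run).
theorem pvLoopA_flatMap (stack : List Int) (hnn : ∀ h ∈ stack, 0 ≤ h) :
    pvLoopA stack = stack.flatMap get_heights_py_alt := by
  induction stack using pvLoopA.induct with
  | case1 => simp [pvLoopA]
  | case2 current rest hpos ih =>
      have h0 : ∀ h ∈ (current - 1) :: (current - 1) :: rest, 0 ≤ h := by
        intro h hm
        simp only [List.mem_cons] at hm
        rcases hm with h1 | h1 | h1
        · omega
        · omega
        · exact hnn h (List.mem_cons_of_mem _ h1)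
      rw [pvLoopA, if_pos hpos, ih h0]
      have hc : get_heights_py_alt current =
          current :: (get_heights_py_alt (current - 1) ++ get_heights_py_alt (current - 1)) := by
        rw [get_heights_py_alt.eq_def, if_neg (by omega)]
      simp [hc, List.flatMap_cons]
  | case3 current rest hpos ih =>
      have hc0 : current = 0 := by
        have := hnn current List.mem_cons_self
        omega
      have ih' := ih (fun h hm => hnn h (List.mem_cons_of_mem _ hm))
      rw [pvLoopA, if_neg hpos, ih']
      subst hc0
      have hc : get_heights_py_alt 0 = [0] := by
        rw [get_heights_py_alt.eq_def, if_neg (by norm_num), get_heights_py_alt.eq_def, if_pos (by norm_num)]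
        simp
      simp [hc, List.flatMap_cons]

-- ===== VERDICT (by name: the statement is the Claim_ definition above) =====
theorem get_heights_py_spec : Claim_equal_get_heights_py := by
  intro height _
  unfold Spec_get_heights_py get_heights_py
  by_cases h : height < 0
  · rw [if_pos h, get_heights_py_alt.eq_def, if_pos h]
  · rw [if_neg h, pvLoopA_flatMap [height] (by simpa using (by omega : (0:Int) ≤ height))]
    simp [List.flatMap_cons]
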